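-- pv_equiv track=rewrite | github.com/jamesben6688/coding | tree/forest_delete.py | delete_node_and_rebuild
-- ===== SOURCE A (Python) =====
-- from collections import defaultdict, deque
--
-- def delete_node_and_rebuild(parent, delete_index):
--     n = len(parent)
--
--     # 1. 建图
--     tree = defaultdict(list)
--     for i in range(n):
--         if parent[i] != -1:
--             tree[parent[i]].append(i)
--
--     # 2. 找到所有需要删除的节点
--     to_delete = set()
--     queue = deque([delete_index])
--     while queue:
--         node = queue.popleft()
--         to_delete.add(node)
--         for child in tree.get(node, []):
--             queue.append(child)
--
--     # 3. 保留未删除的节点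
--     remaining_nodes = [i for i in range(n) if i not in to_delete]
--
--     # 4. 建立旧索引 -> 新索引映射
--     old_to_new = {old: new for new, old in enumerate(remaining_nodes)}
--
--     # 5. 构建新parent数组
--     new_parent = []
--     for old_index in remaining_nodes:
--         p = parent[old_index]
--         if p == -1 or p in to_delete:
--             new_parent.append(-1)
--         else:
--             new_parent.append(old_to_new[p])
--
--     return new_parent
-- ===== SOURCE B (Python) =====
-- def delete_node_and_rebuild(parent, delete_index):
--     n = len(parent)
--
--     # A node is deleted iff walking up its parent chain reaches delete_index
--     # (the walk stops at the root sentinel -1 or at any out-of-range pointer;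
--     # the n+1 bound makes the walk total even on malformed cyclic input).
--     def deleted(cur):
--         for _ in range(n + 1):
--             if cur == -1:
--                 return False
--             if cur == delete_index:
--                 return True
--             if cur < 0 or cur >= n:
--                 return False
--             cur = parent[cur]
--         return False
--
--     new_index = {}
--     for i in range(n):
--         if not deleted(i):
--             new_index[i] = len(new_index)
--
--     result = []
--     for i in range(n):
--         if not deleted(i):
--             p = parent[i]
--             result.append(new_index[p] if p in new_index else -1)
--     return result
-- ===== Notes on version B (the rewrite author's own statement) =====
-- stated objective: simpler
-- what changed: Instead of building a child adjacency dict and BFS-collecting the subtree into a set, B decides deletion per node by walking UP the parent chain until it hits delete_index, -1 or an out-of-range pointer, and builds the new index map and output in two plain passes over range(n).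
import Mathlib
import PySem

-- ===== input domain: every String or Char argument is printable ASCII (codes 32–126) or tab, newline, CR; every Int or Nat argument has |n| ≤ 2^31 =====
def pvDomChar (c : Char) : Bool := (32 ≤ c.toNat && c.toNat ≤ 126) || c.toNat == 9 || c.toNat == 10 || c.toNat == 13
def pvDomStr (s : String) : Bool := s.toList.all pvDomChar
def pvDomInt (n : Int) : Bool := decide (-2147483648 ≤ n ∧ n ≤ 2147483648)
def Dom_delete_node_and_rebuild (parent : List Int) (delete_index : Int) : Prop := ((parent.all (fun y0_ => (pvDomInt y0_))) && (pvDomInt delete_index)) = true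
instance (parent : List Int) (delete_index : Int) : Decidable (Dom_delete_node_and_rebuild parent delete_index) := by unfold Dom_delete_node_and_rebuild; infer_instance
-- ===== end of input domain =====

-- B replaces A's adjacency-dict + BFS subtree collection by a per-node upward
-- parent-chain walk and two plain passes (objective: simpler, not faster).

-- ===== PORT A =====
-- BFS loop of step 2 (while queue: pop, add to set, push children); the fuel
-- argument only makes the loop total — under Pre_ it never runs out (proved below).
def pvBfsA (tree : PySem.Dict Int (List Int)) : Nat → PySem.Set Int → List Int → PySem.Set Int
  | 0, s, _ => s
  | _ + 1, s, [] => s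
  | fuel + 1, s, node :: rest =>
      pvBfsA tree fuel (PySem.Set.add s node) (rest ++ tree.getD node [])

-- step 1: tree = defaultdict(list); tree[parent[i]].append(i)  (i in range(n): index is in range)
def pvTreeA (parent : List Int) : PySem.Dict Int (List Int) :=
  (PySem.List.pyRange 0 (parent.length : Int) 1).foldl
    (fun t i =>
      let p := PySem.List.pyGetD parent i 0
      if p ≠ -1 then t.modify p [] (fun l => l ++ [i]) else t) PySem.Dict.empty

def delete_node_and_rebuild (parent : List Int) (delete_index : Int) : List Int :=
  let n : Int := parent.length
  let tree : PySem.Dict Int (List Int) := pvTreeA parent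
  -- step 2: BFS from delete_index
  let to_delete : PySem.Set Int := pvBfsA tree (parent.length + 1) PySem.Set.empty [delete_index]
  -- step 3: remaining_nodes = [i for i in range(n) if i not in to_delete]
  let remaining : List Int := (PySem.List.pyRange 0 n 1).filter (fun i => !(PySem.Set.contains to_delete i))
  -- step 4: old_to_new = {old: new for new, old in enumerate(remaining_nodes)}
  let old_to_new : PySem.Dict Int Int :=
    (PySem.List.enumerate remaining 0).foldl (fun d pr => d.insert pr.2 pr.1) PySem.Dict.empty
  -- step 5
  remaining.foldl
    (fun acc old =>
      let p := PySem.List.pyGetD parent old 0     -- old ∈ range(n): in range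
      if p = -1 || PySem.Set.contains to_delete p then acc ++ [-1]
      else acc ++ [(old_to_new.get? p).getD 0]) []   -- old_to_new[p]; KeyError excluded by Pre_

-- ===== PORT B =====
-- deleted(cur): walk up the parent chain (bounded by n+1 steps, as in Source B)
def pvDeletedB (parent : List Int) (delete_index : Int) : Nat → Int → Bool
  | 0, _ => false
  | fuel + 1, cur =>
      if cur = -1 then false
      else if cur = delete_index then true
      else if cur < 0 || (parent.length : Int) ≤ cur then false
      else pvDeletedB parent delete_index fuel (PySem.List.pyGetD parent cur 0)

def delete_node_and_rebuild_alt (parent : List Int) (delete_index : Int) : List Int :=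
  let n : Int := parent.length
  let new_index : PySem.Dict Int Int :=
    (PySem.List.pyRange 0 n 1).foldl
      (fun d i =>
        if !(pvDeletedB parent delete_index (parent.length + 1) i) then d.insert i (d.size : Int)
        else d) PySem.Dict.empty
  (PySem.List.pyRange 0 n 1).foldl
    (fun acc i =>
      if !(pvDeletedB parent delete_index (parent.length + 1) i) then
        let p := PySem.List.pyGetD parent i 0
        acc ++ [if new_index.contains p then (new_index.get? p).getD 0 else -1]
      else acc) []

-- ===== PRECONDITION & SPEC =====
-- one parent-pointer step; fixes everything outside [0, n) (used only to state acyclicity)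
def pvStep (parent : List Int) (x : Int) : Int :=
  if 0 ≤ x ∧ x < (parent.length : Int) then PySem.List.pyGetD parent x 0 else x

-- Pre_ excludes (a) parent pointers outside {-1, delete_index} ∪ range(n) at any node other
-- than delete_index itself, on which A raises KeyError, and (b) parent arrays with a pointer
-- cycle through delete_index, on which A's BFS loops forever.
def Pre_delete_node_and_rebuild (parent : List Int) (delete_index : Int) : Prop :=
  (∀ i : Nat, i < parent.length → ((i : Int) = delete_index ∨
     PySem.List.pyGetD parent (i : Int) 0 = -1 ∨
     (0 ≤ PySem.List.pyGetD parent (i : Int) 0 ∧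
      PySem.List.pyGetD parent (i : Int) 0 < (parent.length : Int)) ∨
     PySem.List.pyGetD parent (i : Int) 0 = delete_index)) ∧
  ((0 ≤ delete_index ∧ delete_index < (parent.length : Int)) →
     ∀ t : Nat, t ≤ parent.length → 1 ≤ t →
       (pvStep parent)^[t] delete_index ≠ delete_index)

instance (parent : List Int) (delete_index : Int) : Decidable (Pre_delete_node_and_rebuild parent delete_index) := by
  unfold Pre_delete_node_and_rebuild; infer_instance

def pvWitness_delete_node_and_rebuild : List Int × Int := ([-1, 0, 0, 1], 1)

def Spec_delete_node_and_rebuild (parent : List Int) (delete_index : Int) (out : List Int) : Prop := out = delete_node_and_rebuild_alt parent delete_index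
instance (parent : List Int) (delete_index : Int) (out : List Int) : Decidable (Spec_delete_node_and_rebuild parent delete_index out) := by unfold Spec_delete_node_and_rebuild; infer_instance

-- ===== CLAIM (what is proved, stated in full; the proofs are below) =====
def Claim_equal_delete_node_and_rebuild : Prop := ∀ (parent : List Int) (delete_index : Int), Dom_delete_node_and_rebuild parent delete_index → Pre_delete_node_and_rebuild parent delete_index → Spec_delete_node_and_rebuild parent delete_index (delete_node_and_rebuild parent delete_index)

-- ===== LEMMAS AND PROOFS =====

-- abbreviations used only by the proofs
def pvPg (parent : List Int) (x : Int) : Int := PySem.List.pyGetD parent x 0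

def pvInR (parent : List Int) (x : Int) : Prop := 0 ≤ x ∧ x < (parent.length : Int)

-- Anc parent x y: the upward parent chain from x reaches y
inductive pvAnc (parent : List Int) : Int → Int → Prop
  | base (x : Int) : pvAnc parent x x
  | step {x y : Int} : 0 ≤ x → x < (parent.length : Int) → pvPg parent x ≠ -1 →
      pvAnc parent (pvPg parent x) y → pvAnc parent x y

-- no parent-pointer cycle through d
def pvNoD (parent : List Int) (d : Int) : Prop :=
  ¬ (pvInR parent d ∧ ∃ t : Nat, 1 ≤ t ∧ (pvStep parent)^[t] d = d)

-- decidable form of pvAnc (bounded by n, enough under acyclicity)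
def pvAncb (parent : List Int) (y x : Int) : Bool :=
  (List.range (parent.length + 1)).any (fun m =>
    decide ((∀ j < m, (0 ≤ (pvStep parent)^[j] x ∧ (pvStep parent)^[j] x < (parent.length : Int))
                      ∧ pvPg parent ((pvStep parent)^[j] x) ≠ -1)
            ∧ (pvStep parent)^[m] x = y))

-- children of q, as A's dict stores them
def pvKids (parent : List Int) (q : Int) : List Int :=
  (PySem.List.pyRange 0 (parent.length : Int) 1).filter
    (fun i => !(pvPg parent i == -1) && (pvPg parent i == q))

-- BFS measure
def pvDm (parent : List Int) (q : Int) : Nat :=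
  1 + (PySem.List.pyRange 0 (parent.length : Int) 1).countP
        (fun i => pvAncb parent q i && !(i == q))

theorem pvAnc_trans {parent : List Int} {x y z : Int}
    (h1 : pvAnc parent x y) (h2 : pvAnc parent y z) : pvAnc parent x z := by
  induction h1 with
  | base => exact h2
  | step h0 hlt hne _ ih => exact pvAnc.step h0 hlt hne (ih h2)

theorem pvStep_eq {parent : List Int} {x : Int} (h0 : 0 ≤ x) (h1 : x < (parent.length : Int)) :
    pvStep parent x = pvPg parent x := by
  unfold pvStep pvPg; rw [if_pos ⟨h0, h1⟩]

theorem pvAnc_iff_iter {parent : List Int} {x y : Int} :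
    pvAnc parent x y ↔ ∃ m : Nat,
      (∀ j < m, pvInR parent ((pvStep parent)^[j] x) ∧ pvPg parent ((pvStep parent)^[j] x) ≠ -1)
      ∧ (pvStep parent)^[m] x = y := by
  constructor
  · intro h
    induction h with
    | base x => exact ⟨0, by simp, rfl⟩
    | step h0 hlt hne h ih =>
      obtain ⟨m, hcond, hiter⟩ := ih
      refine ⟨m + 1, ?_, ?_⟩
      · intro j hj
        cases j with
        | zero => exact ⟨⟨h0, hlt⟩, by simpa using hne⟩
        | succ j =>
          rw [Function.iterate_succ_apply, pvStep_eq h0 hlt]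
          exact hcond j (by omega)
      · rw [Function.iterate_succ_apply, pvStep_eq h0 hlt]; exact hiter
  · rintro ⟨m, hcond, hiter⟩
    induction m generalizing x with
    | zero => simpa using hiter ▸ pvAnc.base x
    | succ m ih =>
      obtain ⟨⟨h0, hlt⟩, hne⟩ := hcond 0 (by omega)
      simp only [Function.iterate_zero_apply] at h0 hlt hne
      refine pvAnc.step h0 hlt hne (ih ?_ ?_)
      · intro j hj
        have := hcond (j + 1) (by omega)
        rwa [Function.iterate_succ_apply, pvStep_eq h0 hlt] at this
      · have := hiter
        rwa [Function.iterate_succ_apply, pvStep_eq h0 hlt] at this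

theorem pvStep_fix {parent : List Int} {y : Int} (h : ¬ pvInR parent y) :
    pvStep parent y = y := by
  unfold pvInR at h
  unfold pvStep
  rw [if_neg h]

theorem pvIter_fix {parent : List Int} {y : Int} (h : ¬ pvInR parent y) :
    ∀ k : Nat, (pvStep parent)^[k] y = y := by
  intro k
  induction k with
  | zero => rfl
  | succ k ih => rw [Function.iterate_succ_apply, pvStep_fix h, ih]

theorem pvPeriodicInR {parent : List Int} {x : Int} {t : Nat} (ht : 1 ≤ t)
    (hcyc : (pvStep parent)^[t] x = x)
    (hall : ∀ j < t, pvInR parent ((pvStep parent)^[j] x)) :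
    ∀ k : Nat, pvInR parent ((pvStep parent)^[k] x) := by
  have hper : ∀ k : Nat, (pvStep parent)^[k + t] x = (pvStep parent)^[k] x := by
    intro k; rw [Function.iterate_add_apply, hcyc]
  intro k
  induction k using Nat.strong_induction_on with
  | _ k ih =>
    by_cases hk : k < t
    · exact hall k hk
    · have hk' : k = (k - t) + t := by omega
      rw [hk', hper]
      exact ih (k - t) (by omega)

theorem pvPigeon {parent : List Int} (v : Nat → Int) (m : Nat)
    (hdist : ∀ a, a < m → ∀ b, b < m → v a = v b → a = b)
    (hin : ∀ j, j < m → pvInR parent (v j)) : m ≤ parent.length := by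
  have hmap : ∀ a ∈ Finset.range m, v a ∈ Finset.Ico (0 : Int) (parent.length : Int) := by
    intro a ha
    rw [Finset.mem_range] at ha
    obtain ⟨h0, h1⟩ := hin a ha
    rw [Finset.mem_Ico]; exact ⟨h0, h1⟩
  have hinj : Set.InjOn v (Finset.range m) := by
    intro a ha b hb hab
    simp only [Finset.coe_range, Set.mem_Iio] at ha hb
    exact hdist a ha b hb hab
  have hcard := Finset.card_le_card_of_injOn v hmap hinj
  rw [Finset.card_range, Int.card_Ico] at hcard
  omega

theorem pvNoD_of_bounded {parent : List Int} {d : Int}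
    (h2 : (0 ≤ d ∧ d < (parent.length : Int)) →
      ∀ t : Nat, t ≤ parent.length → 1 ≤ t → (pvStep parent)^[t] d ≠ d) :
    pvNoD parent d := by
  rintro ⟨hdIn, t, ht1, hcyc⟩
  have hex : ∃ t : Nat, 1 ≤ t ∧ (pvStep parent)^[t] d = d := ⟨t, ht1, hcyc⟩
  obtain ⟨hT1, hTc⟩ := Nat.find_spec hex
  set T := Nat.find hex with hTdef
  have hmin : ∀ s, s < T → ¬ (1 ≤ s ∧ (pvStep parent)^[s] d = d) := fun s hs => Nat.find_min hex hs
  have hInRall : ∀ j, j ≤ T → pvInR parent ((pvStep parent)^[j] d) := by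
    intro j hj
    by_contra hout
    have hTj : (pvStep parent)^[T] d = (pvStep parent)^[j] d := by
      have hsplit : T = (T - j) + j := by omega
      rw [hsplit, Function.iterate_add_apply, pvIter_fix hout]
    rw [hTc] at hTj
    exact hout (hTj ▸ hdIn)
  have haux : ∀ a b : Nat, a < b → b < T → (pvStep parent)^[a] d = (pvStep parent)^[b] d → False := by
    intro a b hab hbT heq
    have hcy : (pvStep parent)^[(T - b) + a] d = d := by
      rw [Function.iterate_add_apply, heq, ← Function.iterate_add_apply]
      have : T - b + b = T := by omega
      rw [this, hTc]
    exact hmin (T - b + a) (by omega) ⟨by omega, hcy⟩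
  have hdis : ∀ a, a < T → ∀ b, b < T → (pvStep parent)^[a] d = (pvStep parent)^[b] d → a = b := by
    intro a ha b hb hab
    by_contra hne
    rcases Nat.lt_or_ge a b with h | h
    · exact haux a b h hb hab
    · exact haux b a (by omega) ha hab.symm
  have hTn := pvPigeon (fun j => (pvStep parent)^[j] d) T hdis (fun j hj => hInRall j (by omega))
  exact h2 ⟨hdIn.1, hdIn.2⟩ T hTn hT1 hTc

theorem pvChainLenD {parent : List Int} {d x : Int} {m : Nat} (hnd : pvNoD parent d)
    (hall : ∀ j < m, pvInR parent ((pvStep parent)^[j] x))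
    (hm : (pvStep parent)^[m] x = d) : m ≤ parent.length := by
  by_cases hrep : ∃ a, a < m ∧ ∃ b, a < b ∧ b ≤ m ∧
      (pvStep parent)^[a] x = (pvStep parent)^[b] x
  · obtain ⟨a, ha, b, hab, hbm, heq⟩ := hrep
    set w := (pvStep parent)^[a] x with hw
    have hpw : (pvStep parent)^[b - a] w = w := by
      rw [hw, ← Function.iterate_add_apply]
      have : b - a + a = b := by omega
      rw [this, ← heq]
    have hdw : (pvStep parent)^[m - a] w = d := by
      rw [hw, ← Function.iterate_add_apply]
      have : m - a + a = m := by omega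
      rw [this, hm]
    have hpd : (pvStep parent)^[b - a] d = d := by
      rw [← hdw, ← Function.iterate_add_apply, Nat.add_comm,
        Function.iterate_add_apply, hpw, hdw]
    by_cases hdIn : pvInR parent d
    · exact absurd ⟨hdIn, b - a, by omega, hpd⟩ hnd
    · exfalso
      have hcyclek : ∀ k : Nat, (pvStep parent)^[(b - a) * k] w = w := by
        intro k
        induction k with
        | zero => simp
        | succ k ih => rw [Nat.mul_succ, Function.iterate_add_apply, hpw, ih]
      have hbig : m - a ≤ (b - a) * m := by
        calc m - a ≤ m := by omega
        _ = 1 * m := by omega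
        _ ≤ (b - a) * m := Nat.mul_le_mul_right m (by omega)
      have hwd : w = d := by
        have h1 : (pvStep parent)^[((b - a) * m - (m - a)) + (m - a)] w = w := by
          have : (b - a) * m - (m - a) + (m - a) = (b - a) * m := by omega
          rw [this, hcyclek m]
        rw [Function.iterate_add_apply, hdw, pvIter_fix hdIn] at h1
        exact h1.symm
      exact hdIn (hwd ▸ hall a ha)
  · push Not at hrep
    refine pvPigeon (fun j => (pvStep parent)^[j] x) m ?_ (fun j hj => hall j hj)
    intro a ha b hb hab
    by_contra hne
    rcases Nat.lt_or_ge a b with h | h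
    · exact hrep a ha b h (by omega) hab
    · exact hrep b hb a (by omega) (by omega) hab.symm

theorem pvQCycle {parent : List Int} {d q : Int} {t : Nat} (hnd : pvNoD parent d)
    (hqd : pvAnc parent q d) (ht : 1 ≤ t)
    (hall : ∀ j < t, pvInR parent ((pvStep parent)^[j] q))
    (hcyc : (pvStep parent)^[t] q = q) : False := by
  obtain ⟨m, hcond, hm⟩ := pvAnc_iff_iter.1 hqd
  have hallk := pvPeriodicInR ht hcyc hall
  have hdIn : pvInR parent d := hm ▸ hallk m
  have hpd : (pvStep parent)^[t] d = d := by
    rw [← hm, ← Function.iterate_add_apply, Nat.add_comm,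
      Function.iterate_add_apply, hcyc, hm]
  exact hnd ⟨hdIn, t, ht, hpd⟩

theorem pvAncb_iff {parent : List Int} {d : Int} (hnd : pvNoD parent d) {y x : Int}
    (hyd : pvAnc parent y d) :
    pvAncb parent y x = true ↔ pvAnc parent x y := by
  rw [pvAncb, List.any_eq_true]
  constructor
  · rintro ⟨m, _, hm⟩
    rw [decide_eq_true_iff] at hm
    exact pvAnc_iff_iter.2 ⟨m, by simpa [pvInR] using hm.1, hm.2⟩
  · intro h
    obtain ⟨m1, hcond1, hiter1⟩ := pvAnc_iff_iter.1 h
    obtain ⟨m2, hcond2, hiter2⟩ := pvAnc_iff_iter.1 hyd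
    -- the combined chain x → y → d bounds m1
    have hcomb : ∀ j < m1 + m2, pvInR parent ((pvStep parent)^[j] x) := by
      intro j hj
      rcases Nat.lt_or_ge j m1 with hl | hl
      · exact (hcond1 j hl).1
      · have hsp : j = (j - m1) + m1 := by omega
        rw [hsp, Function.iterate_add_apply, hiter1]
        exact (hcond2 (j - m1) (by omega)).1
    have hend : (pvStep parent)^[m1 + m2] x = d := by
      rw [Nat.add_comm, Function.iterate_add_apply, hiter1, hiter2]
    have hm : m1 + m2 ≤ parent.length := pvChainLenD hnd hcomb hend
    refine ⟨m1, List.mem_range.2 (by omega), ?_⟩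
    rw [decide_eq_true_iff]
    exact ⟨by simpa [pvInR] using hcond1, hiter1⟩

theorem pvAncb_refl {parent : List Int} (x : Int) : pvAncb parent x x = true := by
  rw [pvAncb, List.any_eq_true]
  exact ⟨0, List.mem_range.2 (by omega), by simp⟩

theorem pvDeletedB_neg_one (parent : List Int) (d : Int) (f : Nat) :
    pvDeletedB parent d f (-1) = false := by
  cases f <;> simp [pvDeletedB]

theorem pvDeletedB_sound {parent : List Int} {d : Int} :
    ∀ (f : Nat) (x : Int), pvDeletedB parent d f x = true → pvAnc parent x d := by
  intro f
  induction f with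
  | zero => intro x h; simp [pvDeletedB] at h
  | succ f ih =>
    intro x h
    rw [pvDeletedB] at h
    by_cases h1 : x = -1
    · simp [h1] at h
    · rw [if_neg h1] at h
      by_cases h2 : x = d
      · exact h2 ▸ pvAnc.base x
      · rw [if_neg h2] at h
        by_cases h3 : (x < 0 || (parent.length : Int) ≤ x) = true
        · simp [h3] at h
        · rw [if_neg h3] at h
          simp only [Bool.or_eq_true, decide_eq_true_iff, not_or, not_lt, not_le] at h3
          have hanc := ih _ h
          have hne : PySem.List.pyGetD parent x 0 ≠ -1 := by
            intro hcontra
            rw [hcontra, pvDeletedB_neg_one] at h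
            exact absurd h (by simp)
          exact pvAnc.step h3.1 h3.2 (by simpa [pvPg] using hne) (by simpa [pvPg] using hanc)

theorem pvDeletedB_complete {parent : List Int} {d : Int} :
    ∀ (m : Nat) (x : Int) (f : Nat), x ≠ -1 → m < f →
      (∀ j < m, pvInR parent ((pvStep parent)^[j] x) ∧ pvPg parent ((pvStep parent)^[j] x) ≠ -1) →
      (pvStep parent)^[m] x = d → pvDeletedB parent d f x = true := by
  intro m
  induction m with
  | zero =>
    intro x f hx hf _ hiter
    simp only [Function.iterate_zero_apply] at hiter
    obtain ⟨f, rfl⟩ : ∃ f', f = f' + 1 := ⟨f - 1, by omega⟩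
    rw [pvDeletedB, if_neg hx, hiter]
    simp
  | succ m ih =>
    intro x f hx hf hcond hiter
    obtain ⟨⟨h0, h1⟩, hne⟩ := hcond 0 (by omega)
    simp only [Function.iterate_zero_apply] at h0 h1 hne
    obtain ⟨f, rfl⟩ : ∃ f', f = f' + 1 := ⟨f - 1, by omega⟩
    rw [pvDeletedB, if_neg hx]
    by_cases h2 : x = d
    · rw [if_pos h2]
    · rw [if_neg h2, if_neg (by simp; omega)]
      have hstep : pvStep parent x = PySem.List.pyGetD parent x 0 := by
        rw [pvStep_eq h0 h1]; rfl
      refine ih (PySem.List.pyGetD parent x 0) f ?_ (by omega) ?_ ?_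
      · simpa [pvPg] using hne
      · intro j hj
        have := hcond (j + 1) (by omega)
        rwa [Function.iterate_succ_apply, hstep] at this
      · have := hiter
        rwa [Function.iterate_succ_apply, hstep] at this

theorem pvDeletedB_iff {parent : List Int} {d x : Int} (hnd : pvNoD parent d) (hx : x ≠ -1) :
    pvDeletedB parent d (parent.length + 1) x = true ↔ pvAnc parent x d := by
  constructor
  · exact pvDeletedB_sound _ _
  · intro h
    obtain ⟨m, hcond, hiter⟩ := pvAnc_iff_iter.1 h
    have hm : m ≤ parent.length := pvChainLenD hnd (fun j hj => (hcond j hj).1) hiter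
    exact pvDeletedB_complete m x (parent.length + 1) hx (by omega) hcond hiter

theorem pvMem_kids {parent : List Int} {q c : Int} :
    c ∈ pvKids parent q ↔ (pvInR parent c ∧ pvPg parent c ≠ -1 ∧ pvPg parent c = q) := by
  simp [pvKids, List.mem_filter, PySem.List.mem_pyRange_one, pvInR, and_assoc]

theorem pvAnc_from {parent : List Int} {x q : Int} :
    pvAnc parent x q ↔ x = q ∨ ∃ c ∈ pvKids parent q, pvAnc parent x c := by
  constructor
  · intro h
    induction h with
    | base x => exact Or.inl rfl
    | step h0 hlt hne h ih =>
      rename_i z y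
      rcases ih with heq | ⟨c, hc, hanc⟩
      · exact Or.inr ⟨z, pvMem_kids.2 ⟨⟨h0, hlt⟩, hne, heq⟩, pvAnc.base z⟩
      · exact Or.inr ⟨c, hc, pvAnc.step h0 hlt hne hanc⟩
  · rintro (rfl | ⟨c, hc, hanc⟩)
    · exact pvAnc.base x
    · obtain ⟨⟨h0, h1⟩, hne, heq⟩ := pvMem_kids.1 hc
      exact pvAnc_trans hanc (pvAnc.step h0 h1 hne (by rw [heq]; exact pvAnc.base q))

theorem pvCountP_bool_split (l : List Int) (Q r : Int → Bool) :
    l.countP Q = l.countP (fun i => Q i && r i) + l.countP (fun i => Q i && !r i) := by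
  induction l with
  | nil => simp
  | cons x l ih =>
    simp only [List.countP_cons]
    cases hQ : Q x <;> cases hr : r x <;> simp [hQ, hr] <;> try omega

theorem pvSum_countP_le (L : List Int) (cs : List Int) (p : Int → Int → Bool) (Q : Int → Bool)
    (hsub : ∀ c ∈ cs, ∀ i, p c i = true → Q i = true)
    (hdisj : cs.Pairwise (fun c c' => ∀ i, ¬(p c i = true ∧ p c' i = true))) :
    (cs.map (fun c => L.countP (p c))).sum ≤ L.countP Q := by
  induction cs generalizing Q with
  | nil => simp
  | cons c cs ih =>
    rw [List.pairwise_cons] at hdisj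
    have h1 : L.countP (p c) ≤ L.countP (fun i => Q i && p c i) := by
      refine List.countP_mono_left (fun i _ hpc => ?_)
      simp [hsub c List.mem_cons_self i hpc, hpc]
    have h2 : (cs.map (fun c => L.countP (p c))).sum ≤ L.countP (fun i => Q i && !(p c i)) := by
      refine ih (fun i => Q i && !(p c i)) (fun c' hc' i hp => ?_) hdisj.2
      have hq := hsub c' (List.mem_cons_of_mem _ hc') i hp
      have hnc : ¬ (p c i = true) := fun hpc => hdisj.1 c' hc' i ⟨hpc, hp⟩
      simp [hq, Bool.not_eq_true] at hnc ⊢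
      simp [hnc]
    have h3 := pvCountP_bool_split L Q (p c)
    simp only [List.map_cons, List.sum_cons]
    omega

theorem pvChildStep {parent : List Int} {q c : Int} (hc : c ∈ pvKids parent q) :
    pvStep parent c = q := by
  obtain ⟨⟨h0, h1⟩, _, heq⟩ := pvMem_kids.1 hc
  rw [pvStep_eq h0 h1, heq]

theorem pvNoAncChild {parent : List Int} {d : Int} (hnd : pvNoD parent d) {q c : Int}
    (hqd : pvAnc parent q d) (hc : c ∈ pvKids parent q) (h : pvAnc parent q c) : False := by
  obtain ⟨m, hcond, hiter⟩ := pvAnc_iff_iter.1 h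
  have hcInR : pvInR parent c := (pvMem_kids.1 hc).1
  have hall : ∀ j < m + 1, pvInR parent ((pvStep parent)^[j] q) := by
    intro j hj
    rcases Nat.lt_or_ge j m with h' | h'
    · exact (hcond j h').1
    · have : j = m := by omega
      rw [this, hiter]; exact hcInR
  have hcyc : (pvStep parent)^[m + 1] q = q := by
    rw [Function.iterate_succ_apply', hiter, pvChildStep hc]
  exact pvQCycle hnd hqd (by omega) hall hcyc

theorem pvDisjAux {parent : List Int} {d : Int} (hnd : pvNoD parent d) {q c c' i : Int}
    (hqd : pvAnc parent q d)
    (hc : c ∈ pvKids parent q) (hc' : c' ∈ pvKids parent q) {m1 m2 : Nat} (hlt : m1 < m2)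
    (hcond2 : ∀ j < m2, pvInR parent ((pvStep parent)^[j] i))
    (h1 : (pvStep parent)^[m1] i = c) (h2 : (pvStep parent)^[m2] i = c') : False := by
  have hc'InR : pvInR parent c' := (pvMem_kids.1 hc').1
  have hq : ∀ j, (pvStep parent)^[j] q = (pvStep parent)^[j + 1 + m1] i := by
    intro j
    have : (pvStep parent)^[j + 1 + m1] i = (pvStep parent)^[j + 1] c := by
      rw [Function.iterate_add_apply (pvStep parent) (j + 1) m1 i, h1]
    rw [this, Function.iterate_succ_apply, pvChildStep hc]
  set k := m2 - m1 with hk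
  have hcyc : (pvStep parent)^[k] q = q := by
    have hk1 : k = (k - 1) + 1 := by omega
    rw [hk1, Function.iterate_succ_apply']
    have : (k - 1) + 1 + m1 = m2 := by omega
    rw [hq (k - 1), this, h2, pvChildStep hc']
  have hall : ∀ j < k, pvInR parent ((pvStep parent)^[j] q) := by
    intro j hj
    rw [hq j]
    rcases Nat.lt_or_ge (j + 1 + m1) m2 with h' | h'
    · exact hcond2 _ h'
    · have : j + 1 + m1 = m2 := by omega
      rw [this, h2]; exact hc'InR
  exact pvQCycle hnd hqd (by omega) hall hcyc

theorem pvAncDisj {parent : List Int} {d : Int} (hnd : pvNoD parent d) {q c c' i : Int}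
    (hqd : pvAnc parent q d)
    (hc : c ∈ pvKids parent q) (hc' : c' ∈ pvKids parent q) (hne : c ≠ c')
    (ha : pvAnc parent i c) (ha' : pvAnc parent i c') : False := by
  obtain ⟨m1, hcond1, h1⟩ := pvAnc_iff_iter.1 ha
  obtain ⟨m2, hcond2, h2⟩ := pvAnc_iff_iter.1 ha'
  rcases Nat.lt_trichotomy m1 m2 with h | h | h
  · exact pvDisjAux hnd hqd hc hc' h (fun j hj => (hcond2 j hj).1) h1 h2
  · exact hne (by rw [← h1, ← h2, h])
  · exact pvDisjAux hnd hqd hc' hc h (fun j hj => (hcond1 j hj).1) h2 h1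

theorem pvDm_eq_countP {parent : List Int} {q c : Int} (hcq : c ∈ pvKids parent q) :
    pvDm parent c
      = (PySem.List.pyRange 0 (parent.length : Int) 1).countP (fun i => pvAncb parent c i) := by
  have hcInR : pvInR parent c := (pvMem_kids.1 hcq).1
  have hmem : c ∈ PySem.List.pyRange 0 (parent.length : Int) 1 := by
    rw [PySem.List.mem_pyRange_one]; exact ⟨hcInR.1, hcInR.2⟩
  have hnd : (PySem.List.pyRange 0 (parent.length : Int) 1).Nodup := PySem.List.nodup_pyRange_one _ _
  have hsplit := pvCountP_bool_split (PySem.List.pyRange 0 (parent.length : Int) 1)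
    (fun i => pvAncb parent c i) (fun i => i == c)
  have heqc : (PySem.List.pyRange 0 (parent.length : Int) 1).countP
      (fun i => pvAncb parent c i && (i == c)) = 1 := by
    have hcongr : (PySem.List.pyRange 0 (parent.length : Int) 1).countP
        (fun i => pvAncb parent c i && (i == c))
        = (PySem.List.pyRange 0 (parent.length : Int) 1).countP (fun i => i == c) := by
      refine List.countP_congr (fun i _ => ?_)
      by_cases hi : i = c
      · subst hi; simp [pvAncb_refl]
      · simp [hi]
    rw [hcongr, ← List.count_eq_countP']
    exact List.count_eq_one_of_mem hnd hmem
  rw [pvDm]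
  omega

theorem pvKP {parent : List Int} {d : Int} (hnd : pvNoD parent d) {q : Int}
    (hqd : pvAnc parent q d) :
    ((pvKids parent q).map (pvDm parent)).sum + 1 ≤ pvDm parent q := by
  have hknd : (pvKids parent q).Nodup := List.Nodup.filter _ (PySem.List.nodup_pyRange_one _ _)
  have hmapeq : (pvKids parent q).map (pvDm parent)
      = (pvKids parent q).map (fun c =>
          (PySem.List.pyRange 0 (parent.length : Int) 1).countP (fun i => pvAncb parent c i)) :=
    List.map_congr_left (fun c hc => pvDm_eq_countP hc)
  have hsum := pvSum_countP_le (PySem.List.pyRange 0 (parent.length : Int) 1) (pvKids parent q)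
    (fun c i => pvAncb parent c i) (fun i => pvAncb parent q i && !(i == q))
    (fun c hc i hp => by
      have hcd : pvAnc parent c d :=
        pvAnc_trans (pvAnc_from.2 (Or.inr ⟨c, hc, pvAnc.base c⟩)) hqd
      have hic : pvAnc parent i c := (pvAncb_iff hnd hcd).1 hp
      have hcq : pvAnc parent i q := pvAnc_trans hic
        (pvAnc_from.2 (Or.inr ⟨c, hc, pvAnc.base c⟩))
      have hiq : i ≠ q := by
        rintro rfl
        exact pvNoAncChild hnd hqd hc hic
      simp [(pvAncb_iff hnd hqd).2 hcq, hiq])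
    ((List.Pairwise.imp_of_mem ?_ (hknd)))
  · rw [pvDm, hmapeq]
    beta_reduce at hsum
    omega
  · intro c c' hc hc' hne i ⟨hpi, hpi'⟩
    have hcd : pvAnc parent c d :=
      pvAnc_trans (pvAnc_from.2 (Or.inr ⟨c, hc, pvAnc.base c⟩)) hqd
    have hcd' : pvAnc parent c' d :=
      pvAnc_trans (pvAnc_from.2 (Or.inr ⟨c', hc', pvAnc.base c'⟩)) hqd
    exact pvAncDisj hnd hqd hc hc' hne ((pvAncb_iff hnd hcd).1 hpi) ((pvAncb_iff hnd hcd').1 hpi')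

theorem pvTree_getD (parent : List Int) (q : Int) :
    (pvTreeA parent).getD q [] = pvKids parent q := by
  rw [pvTreeA]
  show ((PySem.List.pyRange 0 (parent.length : Int) 1).foldl
      (fun t i => if PySem.List.pyGetD parent i 0 ≠ -1
                  then t.modify (PySem.List.pyGetD parent i 0) [] (fun l => l ++ [i])
                  else t) PySem.Dict.empty).getD q [] = pvKids parent q
  rw [PySem.List.foldl_ite_eq_foldl_filter]
  rw [← List.foldl_map (f := fun i => (PySem.List.pyGetD parent i 0, i))
        (g := fun (d : PySem.Dict Int (List Int)) (pr : Int × Int) =>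
          d.modify pr.1 [] (fun l => l ++ [pr.2]))]
  rw [PySem.Dict.getD_foldl_modify_append]
  rw [List.filter_map, List.map_map]
  simp only [PySem.Dict.getD_empty, List.nil_append, Function.comp_def, List.map_id_fun']
  rw [List.filter_filter]
  apply List.filter_congr
  intro i _
  simp [pvPg, Bool.and_comm, Bool.beq_eq_decide_eq, decide_not]

theorem pvBfs_spec {parent : List Int} {d : Int} (hnd : pvNoD parent d)
    (tree : PySem.Dict Int (List Int)) (htree : ∀ q, tree.getD q [] = pvKids parent q) :
    ∀ (fuel : Nat) (S : PySem.Set Int) (Q : List Int),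
      (∀ q ∈ Q, pvAnc parent q d) →
      (Q.map (pvDm parent)).sum ≤ fuel →
      ∀ x, x ∈ pvBfsA tree fuel S Q ↔ x ∈ S ∨ ∃ q ∈ Q, pvAnc parent x q := by
  intro fuel
  induction fuel with
  | zero =>
    intro S Q hQ hphi x
    cases Q with
    | nil => simp [pvBfsA]
    | cons q rest =>
      exfalso
      simp only [List.map_cons, List.sum_cons, pvDm, Nat.le_zero] at hphi
      omega
  | succ fuel ih =>
    intro S Q hQ hphi x
    cases Q with
    | nil => simp [pvBfsA]
    | cons q rest =>
      rw [pvBfsA, htree q]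
      have hqd : pvAnc parent q d := hQ q List.mem_cons_self
      have hkp := pvKP hnd hqd
      simp only [List.map_cons, List.sum_cons] at hphi
      have hphi' : ((rest ++ pvKids parent q).map (pvDm parent)).sum ≤ fuel := by
        rw [List.map_append, List.sum_append]
        omega
      have hQ' : ∀ q' ∈ rest ++ pvKids parent q, pvAnc parent q' d := by
        intro q' hq'
        rcases List.mem_append.1 hq' with h | h
        · exact hQ q' (List.mem_cons_of_mem _ h)
        · exact pvAnc_trans (pvAnc_from.2 (Or.inr ⟨q', h, pvAnc.base q'⟩)) hqd
      rw [ih (PySem.Set.add S q) (rest ++ pvKids parent q) hQ' hphi' x]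
      have hAq : pvAnc parent x q ↔ x = q ∨ ∃ c ∈ pvKids parent q, pvAnc parent x c := pvAnc_from
      simp only [PySem.Set.mem_add, List.mem_append, List.mem_cons]
      constructor
      · rintro (⟨hs | rfl⟩ | ⟨q', hq' | hq', hanc⟩)
        · exact Or.inl hs
        · exact Or.inr ⟨x, Or.inl rfl, pvAnc.base x⟩
        · exact Or.inr ⟨q', Or.inr hq', hanc⟩
        · exact Or.inr ⟨q, Or.inl rfl, hAq.2 (Or.inr ⟨q', hq', hanc⟩)⟩
      · rintro (hs | ⟨q', hq' | hq', hanc⟩)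
        · exact Or.inl (Or.inl hs)
        · subst hq'
          rcases hAq.1 hanc with rfl | ⟨c, hc, hanc'⟩
          · exact Or.inl (Or.inr rfl)
          · exact Or.inr ⟨c, Or.inr hc, hanc'⟩
        · exact Or.inr ⟨q', Or.inl hq', hanc⟩

theorem pvDictEnum (L : List Int) : ∀ (dd : PySem.Dict Int Int),
    (∀ i ∈ L, dd.contains i = false) → L.Nodup →
    L.foldl (fun d i => d.insert i (d.size : Int)) dd
      = (PySem.List.enumerate L (dd.size : Int)).foldl (fun d pr => d.insert pr.2 pr.1) dd := by
  induction L with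
  | nil => intro dd _ _; simp [PySem.List.enumerate_nil]
  | cons i L ih =>
    intro dd hfresh hnd
    rw [List.foldl_cons, PySem.List.enumerate_cons, List.foldl_cons]
    have hsize : (dd.insert i (dd.size : Int)).size = dd.size + 1 := by
      rw [PySem.Dict.size_insert, hfresh i List.mem_cons_self]
      simp
    have hfresh' : ∀ j ∈ L, (dd.insert i (dd.size : Int)).contains j = false := by
      intro j hj
      rw [PySem.Dict.contains_insert]
      have hne : j ≠ i := fun h => (List.nodup_cons.1 hnd).1 (h ▸ hj)
      simp [hne, hfresh j (List.mem_cons_of_mem _ hj)]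
    have := ih (dd.insert i (dd.size : Int)) hfresh' (List.nodup_cons.1 hnd).2
    rw [this, hsize]
    norm_num

theorem pvFoldl_ite_push (l : List Int) (acc : List Int) (c : Int → Bool) (f g : Int → Int) :
    l.foldl (fun acc x => if c x then acc ++ [f x] else acc ++ [g x]) acc
      = acc ++ l.map (fun x => if c x then f x else g x) := by
  induction l generalizing acc with
  | nil => simp
  | cons x l ih =>
    cases hx : c x <;> simp [hx, ih]

-- ===== VERDICT (by name: the statement is the Claim_ definition above) =====
theorem delete_node_and_rebuild_spec : Claim_equal_delete_node_and_rebuild := by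
  intro parent delete_index hdom hpre
  obtain ⟨hval, hbnd⟩ := hpre
  have hnd : pvNoD parent delete_index :=
    pvNoD_of_bounded (fun h t ht h1 => hbnd h t ht h1)
  unfold Spec_delete_node_and_rebuild
  simp only [delete_node_and_rebuild, delete_node_and_rebuild_alt]
  set TD := pvBfsA (pvTreeA parent) (parent.length + 1) PySem.Set.empty [delete_index] with hTD
  have hlen : (PySem.List.pyRange 0 (parent.length : Int) 1).length = parent.length := by
    rw [PySem.List.length_pyRange_one]; omega
  have hphi : ([delete_index].map (pvDm parent)).sum ≤ parent.length + 1 := by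
    simp only [List.map_cons, List.map_nil, List.sum_cons, List.sum_nil, pvDm]
    have := List.countP_le_length
      (p := fun i => pvAncb parent delete_index i && !(i == delete_index))
      (l := PySem.List.pyRange 0 (parent.length : Int) 1)
    omega
  have htd : ∀ x : Int, x ∈ TD ↔ pvAnc parent x delete_index := by
    intro x
    rw [hTD, pvBfs_spec hnd _ (pvTree_getD parent) _ _ _
      (by intro q hq; rw [List.mem_singleton] at hq; rw [hq]; exact pvAnc.base _) hphi x]
    simp [PySem.Set.empty]
  have hDelC : ∀ i : Int, i ≠ -1 →
      PySem.Set.contains TD i = pvDeletedB parent delete_index (parent.length + 1) i := by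
    intro i hi
    rw [Bool.eq_iff_iff, PySem.Set.contains_iff, htd i, pvDeletedB_iff hnd hi]
  have hF : (PySem.List.pyRange 0 (parent.length : Int) 1).filter
        (fun i => !(PySem.Set.contains TD i))
      = (PySem.List.pyRange 0 (parent.length : Int) 1).filter
        (fun i => !(pvDeletedB parent delete_index (parent.length + 1) i)) := by
    refine List.filter_congr (fun i hi => ?_)
    have h0 : (0 : Int) ≤ i := (PySem.List.mem_pyRange_one.1 hi).1
    rw [hDelC i (by omega)]
  rw [hF]
  set F := (PySem.List.pyRange 0 (parent.length : Int) 1).filter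
      (fun i => !(pvDeletedB parent delete_index (parent.length + 1) i)) with hFdef
  have hFnd : F.Nodup := List.Nodup.filter _ (PySem.List.nodup_pyRange_one _ _)
  have hmemF : ∀ x : Int, x ∈ F ↔ (pvInR parent x ∧ ¬ pvAnc parent x delete_index) := by
    intro x
    rw [hFdef, List.mem_filter, PySem.List.mem_pyRange_one]
    constructor
    · rintro ⟨⟨h0, h1⟩, hb⟩
      refine ⟨⟨h0, h1⟩, fun hanc => ?_⟩
      rw [(pvDeletedB_iff hnd (by omega)).2 hanc] at hb
      simp at hb
    · rintro ⟨⟨h0, h1⟩, hanc⟩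
      refine ⟨⟨h0, h1⟩, ?_⟩
      cases hdel : pvDeletedB parent delete_index (parent.length + 1) x
      · simp
      · exact absurd ((pvDeletedB_iff hnd (by omega)).1 hdel) hanc
  -- the two index dicts are equal
  have hdict := pvDictEnum F PySem.Dict.empty (fun i _ => PySem.Dict.contains_empty i) hFnd
  simp only [PySem.Dict.size_empty, Nat.cast_zero] at hdict
  rw [PySem.List.foldl_append_if]
  rw [PySem.List.foldl_if_eq_foldl_filter]
  rw [← hFdef, ← hdict]
  set D := F.foldl (fun d i => d.insert i (d.size : Int)) PySem.Dict.empty with hDdef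
  have hDcont : ∀ x : Int, D.contains x = true ↔ x ∈ F := by
    intro x
    rw [PySem.Dict.contains_iff_mem_keys, hDdef, PySem.Dict.keys_foldl_insert,
      PySem.Dict.keys_empty, PySem.Set.update_nil_left, PySem.Set.mem_ofList]
  have hcontTD : ∀ x : Int, PySem.Set.contains TD x = true ↔ pvAnc parent x delete_index := by
    intro x
    rw [PySem.Set.contains_iff, htd]
  -- push A's loop into a map over F
  rw [pvFoldl_ite_push]
  simp only [List.nil_append]
  refine List.map_congr_left (fun old hold => ?_)
  obtain ⟨⟨h0, h1⟩, hancold⟩ := (hmemF old).1 hold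
  set p := PySem.List.pyGetD parent old 0 with hpdef
  have hvp : p = -1 ∨ (0 ≤ p ∧ p < (parent.length : Int)) ∨ p = delete_index := by
    have h := hval old.toNat (by omega)
    rw [Int.toNat_of_nonneg h0, ← hpdef] at h
    rcases h with h | h
    · exact absurd (h ▸ pvAnc.base old) hancold
    · exact h
  by_cases hanc : pvAnc parent p delete_index
  · have hA : p ∈ TD := (htd p).2 hanc
    have hB : D.contains p = false := by
      rw [← Bool.not_eq_true, hDcont p, hmemF p]
      rintro ⟨_, h⟩; exact h hanc
    simp [hA, hB]
  · by_cases hp1 : p = -1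
    · have hB : D.contains (-1 : Int) = false := by
        rw [← Bool.not_eq_true, hDcont (-1 : Int), hmemF (-1 : Int)]
        rintro ⟨⟨hc0, _⟩, _⟩
        omega
      simp [hp1, hB]
    · have hInR : pvInR parent p := by
        rcases hvp with h | h | h
        · exact absurd h hp1
        · exact h
        · exact absurd (h ▸ pvAnc.base p) hanc
      have hA : p ∉ TD := fun h => hanc ((htd p).1 h)
      have hB : D.contains p = true := (hDcont p).2 ((hmemF p).2 ⟨hInR, hanc⟩)
      simp [hA, hB, hp1]
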